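-- pv_equiv track=rewrite | github.com/gridvisi/Python_workspace | Zero 2 Hero Class/String_space/6 kyu Frog jumping.py | solution
-- ===== SOURCE A (Python) =====
-- def solution(a):
--     if not a: return -1
--     posSet, i = set(), 0
--     while i not in posSet:
--         posSet.add(i)
--         i += a[i]
--         if not (0 <= i < len(a)):
--             return len(posSet)
--     return -1
-- ===== SOURCE B (Python) =====
-- def solution(a):
--     n = len(a)
--     if n == 0:
--         return -1
--     # build the explicit jump trajectory; by pigeonhole an escape, if any,
--     # happens within n jumps, so the path never needs more than n+1 entries
--     pos = [0]
--     while len(pos) <= n and 0 <= pos[-1] < n: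
--         pos.append(pos[-1] + a[pos[-1]])
--     if 0 <= pos[-1] < n:
--         return -1
--     return len(pos) - 1
-- ===== Notes on version B (the rewrite author's own statement) =====
-- stated objective: alternative
-- what changed: Replaces the visited-set cycle detection with an explicit trajectory list bounded to len(a)+1 entries: by pigeonhole any escape occurs within len(a) jumps, so the frog is cycling iff the path's last entry is still in range.
import Mathlib
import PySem

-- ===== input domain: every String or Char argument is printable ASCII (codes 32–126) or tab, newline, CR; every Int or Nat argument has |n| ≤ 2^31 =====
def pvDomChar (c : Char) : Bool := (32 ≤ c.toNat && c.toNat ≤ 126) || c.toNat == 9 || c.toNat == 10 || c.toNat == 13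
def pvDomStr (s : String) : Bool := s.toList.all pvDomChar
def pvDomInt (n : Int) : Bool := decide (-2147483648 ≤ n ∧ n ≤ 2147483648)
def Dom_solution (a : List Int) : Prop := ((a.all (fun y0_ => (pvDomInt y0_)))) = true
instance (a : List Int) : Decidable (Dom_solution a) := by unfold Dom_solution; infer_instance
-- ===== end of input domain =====

-- B drops A's visited set: it records the explicit jump trajectory, capped at len(a)+1
-- entries (pigeonhole: any escape happens within len(a) jumps), and reads the verdict off
-- the path's last entry — a different decomposition of the same O(n) simulation.

-- ===== PORT A =====
-- A's while loop, ported with fuel a.length + 1; each iteration adds a fresh in-range position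
-- to the set, so at most a.length + 1 iterations ever run and the fuel-out branch is unreachable.
def solutionLoop (a : List Int) : Nat → PySem.Set Int → Int → Int
  | 0, _, _ => -1
  | fuel+1, posSet, i =>
    if posSet.contains i then -1
    else
      let posSet' := PySem.Set.add posSet i
      match PySem.List.pyGet? a i with
      | none => -1   -- unreachable: i is a valid index whenever a[i] is evaluated
      | some x =>
        let i' := i + x
        if 0 ≤ i' ∧ i' < (a.length : Int) then solutionLoop a fuel posSet' i'
        else PySem.Set.len posSet'

def solution (a : List Int) : Int :=
  if a = [] then -1 else solutionLoop a (a.length + 1) PySem.Set.empty 0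

-- ===== PORT B =====
-- B's while loop: grow the trajectory list `pos` while it has ≤ len(a) entries and its last
-- entry is in range; fuel a.length + 1 makes the fuel-out branch unreachable. The index read
-- a[pos[-1]] happens only under the in-range guard, so pyGetD's default is never used.
def solutionAltLoop (a : List Int) : Nat → List Int → List Int
  | 0, pos => pos
  | fuel+1, pos =>
    match pos.getLast? with
    | none => pos   -- unreachable: pos starts nonempty and only grows
    | some p =>
      if pos.length ≤ a.length ∧ 0 ≤ p ∧ p < (a.length : Int) then
        solutionAltLoop a fuel (pos ++ [p + PySem.List.pyGetD a p 0])
      else pos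

def solution_alt (a : List Int) : Int :=
  if a = [] then -1
  else
    let pos := solutionAltLoop a (a.length + 1) [0]
    match pos.getLast? with
    | none => -1   -- unreachable
    | some p => if 0 ≤ p ∧ p < (a.length : Int) then -1 else (pos.length : Int) - 1

-- ===== PRECONDITION & SPEC =====
def Spec_solution (a : List Int) (out : Int) : Prop := out = solution_alt a
instance (a : List Int) (out : Int) : Decidable (Spec_solution a out) := by unfold Spec_solution; infer_instance

-- ===== CLAIM (what is proved, stated in full; the proofs are below) =====
def Claim_equal_solution : Prop := ∀ (a : List Int), Dom_solution a → Spec_solution a (solution a)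

-- ===== LEMMAS AND PROOFS =====

-- the jump trajectory both programs follow: position after k jumps
-- (the default 0 of pyGetD is never read at the indices the proofs use)
def traj (a : List Int) : Nat → Int
  | 0 => 0
  | k+1 => traj a k + PySem.List.pyGetD a (traj a k) 0

abbrev inR (a : List Int) (i : Int) : Prop := 0 ≤ i ∧ i < (a.length : Int)

-- the trajectory prefix B's list holds after k successful iterations
def pathTo (a : List Int) (k : Nat) : List Int := (List.range (k+1)).map (traj a)

lemma pathTo_zero (a : List Int) : pathTo a 0 = [0] := rfl

lemma pathTo_len (a : List Int) (k : Nat) : (pathTo a k).length = k + 1 := by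
  simp [pathTo]

lemma pathTo_succ (a : List Int) (k : Nat) :
    pathTo a (k+1) = pathTo a k ++ [traj a (k+1)] := by
  simp [pathTo, List.range_succ]

lemma pathTo_last (a : List Int) (k : Nat) :
    (pathTo a k).getLast? = some (traj a k) := by
  rw [pathTo, List.range_succ]
  simp

lemma pyGet?_of_inR (a : List Int) (i : Int) (h : inR a i) :
    PySem.List.pyGet? a i = some (PySem.List.pyGetD a i 0) := by
  obtain ⟨h0, h1⟩ := h
  have hi : i = ((i.toNat : Nat) : Int) := by omega
  rw [hi, PySem.List.pyGet?_natCast, PySem.List.pyGetD_natCast]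
  have hlt : i.toNat < a.length := by omega
  simp [List.getElem?_eq_getElem hlt, List.getD]

lemma set_contains_iff (S : PySem.Set Int) (x : Int) :
    PySem.Set.contains S x = true ↔ x ∈ S := by
  simp [PySem.Set.contains]

-- one unfolding step of each loop
lemma altLoop_step (a : List Int) (fuel k : Nat) :
    solutionAltLoop a (fuel+1) (pathTo a k) =
      if k + 1 ≤ a.length ∧ inR a (traj a k)
      then solutionAltLoop a fuel (pathTo a (k+1))
      else pathTo a k := by
  rw [solutionAltLoop, pathTo_last]
  simp only [pathTo_len]
  have hstep : traj a k + PySem.List.pyGetD a (traj a k) 0 = traj a (k+1) := rfl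
  rw [hstep, ← pathTo_succ]

lemma loop_succ_not_mem (a : List Int) (fuel : Nat) (S : PySem.Set Int) (i : Int)
    (h : inR a i) (hmem : PySem.Set.contains S i = false) :
    solutionLoop a (fuel+1) S i =
      if inR a (i + PySem.List.pyGetD a i 0)
      then solutionLoop a fuel (S.add i) (i + PySem.List.pyGetD a i 0)
      else PySem.Set.len (S.add i) := by
  rw [solutionLoop, hmem, if_neg Bool.false_ne_true, pyGet?_of_inR a i h]

lemma loop_succ_mem (a : List Int) (fuel : Nat) (S : PySem.Set Int) (i : Int)
    (hmem : PySem.Set.contains S i = true) :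
    solutionLoop a (fuel+1) S i = -1 := by
  rw [solutionLoop, hmem, if_pos rfl]

lemma traj_period (a : List Int) (i j : Nat) (h : traj a i = traj a j) :
    ∀ s, traj a (i + s) = traj a (j + s) := by
  intro s
  induction s with
  | zero => simpa using h
  | succ s ih =>
    have h1 : traj a (i + (s+1)) = traj a (i+s) + PySem.List.pyGetD a (traj a (i+s)) 0 := rfl
    have h2 : traj a (j + (s+1)) = traj a (j+s) + PySem.List.pyGetD a (traj a (j+s)) 0 := rfl
    rw [h1, h2, ih]

-- B's loop, cycle case: positions stay in range for n jumps, so it fills the path to length n+1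
lemma alt_full (a : List Int) (hin : ∀ s, s ≤ a.length → inR a (traj a s)) :
    ∀ fuel k, k ≤ a.length → a.length - k ≤ fuel →
      solutionAltLoop a fuel (pathTo a k) = pathTo a a.length := by
  intro fuel
  induction fuel with
  | zero =>
    intro k hk hf
    have : k = a.length := by omega
    subst this; rfl
  | succ fuel ih =>
    intro k hk hf
    rw [altLoop_step]
    rcases Nat.lt_or_ge k a.length with h | h
    · rw [if_pos ⟨by omega, hin k (by omega)⟩]
      exact ih (k+1) (by omega) (by omega)
    · have : k = a.length := by omega
      subst this
      rw [if_neg (by intro ⟨h1, _⟩; omega)]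

-- B's loop, escape case: with the first out-of-range position t jumps away (t ≤ n),
-- the loop stops with exactly the path of length t+1
lemma alt_esc (a : List Int) (t : Nat) (ht : t ≤ a.length)
    (hin : ∀ s, s < t → inR a (traj a s)) (hout : ¬ inR a (traj a t)) :
    ∀ fuel k, k ≤ t → t - k ≤ fuel →
      solutionAltLoop a fuel (pathTo a k) = pathTo a t := by
  intro fuel
  induction fuel with
  | zero =>
    intro k hk hf
    have : k = t := by omega
    subst this; rfl
  | succ fuel ih =>
    intro k hk hf
    rw [altLoop_step]
    rcases Nat.lt_or_ge k t with h | h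
    · rw [if_pos ⟨by omega, hin k h⟩]
      exact ih (k+1) (by omega) (by omega)
    · have : k = t := by omega
      subst this
      rw [if_neg (by intro ⟨_, h2⟩; exact hout h2)]

-- membership in the set after one more insertion describes one more trajectory prefix
lemma add_contains_iff (a : List Int) (k : Nat) (S : PySem.Set Int)
    (hS : ∀ x, S.contains x = true ↔ ∃ j, j < k ∧ traj a j = x)
    (hnot : traj a k ∉ S) (x : Int) :
    (S.add (traj a k)).contains x = true ↔ ∃ j, j < k + 1 ∧ traj a j = x := by
  rw [PySem.Set.add_of_not_mem hnot, set_contains_iff, List.mem_append]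
  constructor
  · rintro (h | h)
    · obtain ⟨j, hj, hje⟩ := (hS x).mp ((set_contains_iff S x).mpr h)
      exact ⟨j, by omega, hje⟩
    · have hx := List.mem_singleton.mp h
      exact ⟨k, by omega, hx.symm⟩
  · rintro ⟨j, hj, rfl⟩
    rcases Nat.lt_or_ge j k with hjk | hjk
    · exact Or.inl ((set_contains_iff S _).mp ((hS _).mpr ⟨j, hjk, rfl⟩))
    · have : j = k := by omega
      subst this; exact Or.inr (by simp)

-- A's loop, cycle case: the first repeated position is reached before any escape, so A returns -1
lemma a_cyc (a : List Int) (m0 j0 : Nat) (hj0 : j0 < m0) (heq : traj a j0 = traj a m0)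
    (hin : ∀ s, s ≤ m0 → inR a (traj a s))
    (hdist : ∀ i j, i < j → j < m0 → traj a i ≠ traj a j) :
    ∀ fuel k (S : PySem.Set Int), k ≤ m0 →
      (∀ x, S.contains x = true ↔ ∃ j, j < k ∧ traj a j = x) →
      m0 + 1 - k ≤ fuel →
      solutionLoop a fuel S (traj a k) = -1 := by
  intro fuel
  induction fuel with
  | zero => intro k S hk _ hfuel; omega
  | succ fuel ih =>
    intro k S hk hS hfuel
    rcases Nat.lt_or_ge k m0 with hkm | hkm
    · have hmem : S.contains (traj a k) = false := by
        rw [Bool.eq_false_iff]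
        intro h
        obtain ⟨j, hj, hje⟩ := (hS _).mp h
        exact hdist j k hj hkm hje
      have hnot : traj a k ∉ S := fun hx =>
        Bool.false_ne_true (hmem ▸ (set_contains_iff S _).mpr hx)
      rw [loop_succ_not_mem a fuel S _ (hin k (by omega)) hmem]
      have hstep : traj a k + PySem.List.pyGetD a (traj a k) 0 = traj a (k + 1) := rfl
      rw [hstep, if_pos (hin (k + 1) (by omega))]
      exact ih (k + 1) _ (by omega) (add_contains_iff a k S hS hnot) (by omega)
    · have hkm0 : k = m0 := by omega
      subst hkm0
      exact loop_succ_mem a fuel S _ ((hS _).mpr ⟨j0, hj0, heq⟩)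

-- A's loop, escape case: with distinct in-range positions p_k..p_{t-1}, A escapes at jump t
-- and returns the set size t
lemma a_esc (a : List Int) (t : Nat)
    (hin : ∀ s, s < t → inR a (traj a s))
    (hout : ¬ inR a (traj a t))
    (hdist : ∀ i j, i < j → j < t → traj a i ≠ traj a j) :
    ∀ fuel k (S : PySem.Set Int), k < t →
      (∀ x, S.contains x = true ↔ ∃ j, j < k ∧ traj a j = x) →
      S.length = k →
      t - k ≤ fuel →
      solutionLoop a fuel S (traj a k) = (t : Int) := by
  intro fuel
  induction fuel with
  | zero => intro k S hk _ _ hfuel; omega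
  | succ fuel ih =>
    intro k S hk hS hlen hfuel
    have hmem : S.contains (traj a k) = false := by
      rw [Bool.eq_false_iff]
      intro h
      obtain ⟨j, hj, hje⟩ := (hS _).mp h
      exact hdist j k hj hk hje
    have hnot : traj a k ∉ S := fun hx =>
      Bool.false_ne_true (hmem ▸ (set_contains_iff S _).mpr hx)
    rw [loop_succ_not_mem a fuel S _ (hin k hk) hmem]
    have hstep : traj a k + PySem.List.pyGetD a (traj a k) 0 = traj a (k + 1) := rfl
    rw [hstep]
    rcases Nat.lt_or_ge (k + 1) t with h1 | h1
    · rw [if_pos (hin (k + 1) h1)]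
      refine ih (k + 1) _ h1 (add_contains_iff a k S hS hnot) ?_ (by omega)
      rw [PySem.Set.add_of_not_mem hnot]
      simp [hlen]
    · have hkt : k + 1 = t := by omega
      rw [if_neg (by rw [hkt]; exact hout)]
      rw [PySem.Set.add_of_not_mem hnot]
      simp [PySem.Set.len, hlen]
      omega

-- if all positions up to a.length jumps are in range, some position repeats (pigeonhole)
lemma pigeonhole (a : List Int)
    (hall : ∀ s, s ≤ a.length → inR a (traj a s)) :
    ∃ j k, j < k ∧ k ≤ a.length ∧ traj a j = traj a k := by
  obtain ⟨x, hx, y, hy, hne, he⟩ :=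
    Finset.exists_ne_map_eq_of_card_lt_of_maps_to
      (s := Finset.range (a.length + 1)) (t := Finset.range a.length)
      (by simp) (f := fun s => (traj a s).toNat)
      (fun s hs => by
        have hs' : s < a.length + 1 := Finset.mem_range.mp hs
        obtain ⟨h0, h1⟩ := hall s (by omega)
        show (traj a s).toNat ∈ Finset.range a.length
        exact Finset.mem_range.mpr (by omega))
  rw [Finset.mem_range] at hx hy
  obtain ⟨hx0, _⟩ := hall x (by omega)
  obtain ⟨hy0, _⟩ := hall y (by omega)
  have heq : traj a x = traj a y := by omega
  rcases Nat.lt_or_ge x y with h | h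
  · exact ⟨x, y, h, by omega, heq⟩
  · exact ⟨y, x, by omega, by omega, heq.symm⟩

-- if some jump ever leaves the range, the first one does so within a.length jumps
lemma first_esc_le (a : List Int) (hne : a ≠ [])
    (hE : ∃ t, 0 < t ∧ ¬ inR a (traj a t)) :
    Nat.find hE ≤ a.length := by
  by_contra hgt
  push Not at hgt
  have hall : ∀ s, s ≤ a.length → inR a (traj a s) := by
    intro s hs
    rcases Nat.eq_zero_or_pos s with rfl | hs0
    · refine ⟨le_refl 0, ?_⟩
      show (0:Int) < (a.length:Int)
      exact_mod_cast List.length_pos_iff.mpr hne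
    · by_contra h
      exact Nat.find_min hE (by omega) ⟨hs0, h⟩
  obtain ⟨j, k, hjk, hkn, heq⟩ := pigeonhole a hall
  have ht := Nat.find_spec hE
  have hper := traj_period a j k heq (Nat.find hE - k)
  have hkt : k + (Nat.find hE - k) = Nat.find hE := by omega
  rw [hkt] at hper
  have hlt : j + (Nat.find hE - k) < Nat.find hE := by omega
  exact Nat.find_min hE hlt ⟨by omega, fun h => ht.2 (hper ▸ h)⟩

-- ===== VERDICT (by name: the statement is the Claim_ definition above) =====
theorem solution_spec : Claim_equal_solution := by
  unfold Claim_equal_solution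
  intro a _
  unfold Spec_solution
  by_cases hne : a = []
  · subst hne; rfl
  · rw [solution, solution_alt, if_neg hne, if_neg hne]
    have h0 : inR a (traj a 0) := by
      refine ⟨le_refl 0, ?_⟩
      show (0:Int) < (a.length:Int)
      exact_mod_cast List.length_pos_iff.mpr hne
    have hempty : ∀ x : Int, PySem.Set.contains PySem.Set.empty x = true ↔
        ∃ j, j < 0 ∧ traj a j = x := by
      intro x
      simp [PySem.Set.contains, PySem.Set.empty]
    by_cases hE : ∃ t, 0 < t ∧ ¬ inR a (traj a t)
    · -- escape at the first out-of-range jump t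
      have ht := Nat.find_spec hE
      have htle : Nat.find hE ≤ a.length := first_esc_le a hne hE
      have hin : ∀ s, s < Nat.find hE → inR a (traj a s) := by
        intro s hs
        rcases Nat.eq_zero_or_pos s with rfl | hp
        · exact h0
        · by_contra h
          exact Nat.find_min hE hs ⟨hp, h⟩
      have hdist : ∀ i j, i < j → j < Nat.find hE → traj a i ≠ traj a j := by
        intro i j hij hjt heq
        have hper := traj_period a i j heq (Nat.find hE - j)
        have hje2 : j + (Nat.find hE - j) = Nat.find hE := by omega
        rw [hje2] at hper
        have hlt : i + (Nat.find hE - j) < Nat.find hE := by omega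
        exact ht.2 (hper ▸ hin _ hlt)
      have hA := a_esc a (Nat.find hE) hin ht.2 hdist (a.length + 1) 0
        PySem.Set.empty ht.1 hempty rfl (by omega)
      have hB := alt_esc a (Nat.find hE) htle hin ht.2 (a.length + 1) 0
        (by omega) (by omega)
      rw [pathTo_zero] at hB
      have h0t : traj a 0 = 0 := rfl
      rw [h0t] at hA
      rw [hA]
      simp only [hB, pathTo_last, pathTo_len]
      rw [if_neg ht.2]
      push_cast
      ring
    · -- no escape: the path fills to length a.length + 1 and its last entry is in range
      push Not at hE
      have hall : ∀ s, s ≤ a.length → inR a (traj a s) := by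
        intro s _
        rcases Nat.eq_zero_or_pos s with rfl | hp
        · exact h0
        · exact hE s hp
      obtain ⟨j, k, hjk, hkle, heq⟩ := pigeonhole a hall
      have hM : ∃ m, ∃ j, j < m ∧ traj a j = traj a m := ⟨k, j, hjk, heq⟩
      obtain ⟨j0, hj0, heq0⟩ := Nat.find_spec hM
      have hm0le : Nat.find hM ≤ a.length := le_trans (Nat.find_le ⟨j, hjk, heq⟩) hkle
      have hdist : ∀ i j', i < j' → j' < Nat.find hM → traj a i ≠ traj a j' :=
        fun i j' hij hj'm heq' => Nat.find_min hM hj'm ⟨i, hij, heq'⟩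
      have hin : ∀ s, s ≤ Nat.find hM → inR a (traj a s) :=
        fun s hs => hall s (by omega)
      have hA := a_cyc a (Nat.find hM) j0 hj0 heq0 hin hdist (a.length + 1) 0
        PySem.Set.empty (by omega) hempty (by omega)
      have hB := alt_full a hall (a.length + 1) 0 (by omega) (by omega)
      rw [pathTo_zero] at hB
      have h0t : traj a 0 = 0 := rfl
      rw [h0t] at hA
      rw [hA]
      simp only [hB, pathTo_last]
      rw [if_pos (hall a.length (le_refl _))]
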